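-- pv_equiv track=rewrite | github.com/thiagopelizoni/MathChallenges | src/problem_147.py | tilted
-- ===== SOURCE A (Python) =====
-- def tilted(m, n):
--     ranges = [
--         (max(-u, u - 2 * n), min(2 * m - u, u))
--         for u in range(m + n + 1)
--     ]
--     total = 0
--
--     for i, (lo1, hi1) in enumerate(ranges):
--         for lo2, hi2 in ranges[i + 1:]:
--             k = min(hi1, hi2) - max(lo1, lo2) + 1
--             if k >= 2:
--                 total += k * (k - 1) // 2
--
--     return total
-- ===== SOURCE B (Python) =====
-- def tilted(m, n):
--     intervals = [
--         (max(-u, u - 2 * n), min(2 * m - u, u))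
--         for u in range(m + n + 1)
--     ]
--     if not intervals:
--         return 0
--     p_lo = min(lo for lo, _ in intervals)
--     p_hi = max(hi for _, hi in intervals)
--     total = 0
--     for a in range(p_lo, p_hi + 1):
--         # histogram of right endpoints of the intervals that contain point a's column
--         freq = {}
--         for lo, hi in intervals:
--             if lo <= a:
--                 freq[hi] = freq.get(hi, 0) + 1
--         # sweep b downward: c = number of intervals containing both points a and b
--         c = 0
--         for b in range(p_hi, a, -1):
--             c += freq.get(b, 0)
--             total += c * (c - 1) // 2
--     return total
-- ===== Notes on version B (the rewrite author's own statement) =====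
-- stated objective: alternative
-- what changed: Instead of summing C(overlap,2) over all interval pairs, B counts (interval-pair, point-pair) incidences point-pair first: for every pair of integer points a<b in the global span it counts the intervals containing both (via a per-column histogram of right endpoints swept downward) and adds C(c,2).
import Mathlib
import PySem

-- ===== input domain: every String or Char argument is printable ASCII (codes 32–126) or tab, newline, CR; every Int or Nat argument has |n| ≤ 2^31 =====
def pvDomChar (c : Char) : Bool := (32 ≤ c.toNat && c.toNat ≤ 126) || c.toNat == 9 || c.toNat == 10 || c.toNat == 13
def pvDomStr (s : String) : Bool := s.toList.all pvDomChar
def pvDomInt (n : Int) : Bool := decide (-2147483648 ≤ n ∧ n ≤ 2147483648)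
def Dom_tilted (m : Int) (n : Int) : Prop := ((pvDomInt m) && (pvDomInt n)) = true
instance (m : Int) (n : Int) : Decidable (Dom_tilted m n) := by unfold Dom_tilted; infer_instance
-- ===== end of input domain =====

-- B counts the same (interval-pair, point-pair) incidences point-pair first instead of interval-pair first (alternative decomposition, similar cost); return values proved equal.

-- ===== PORT A =====
def tilted (m : Int) (n : Int) : Int :=
  let ranges : List (Int × Int) :=
    (PySem.List.pyRange 0 (m + n + 1) 1).map
      (fun u => (max (-u) (u - 2 * n), min (2 * m - u) u))
  (PySem.List.enumerate ranges).foldl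
    (fun total ip =>
      (PySem.List.slice ranges (some (ip.1 + 1)) none).foldl
        (fun total q =>
          let k := min ip.2.2 q.2 - max ip.2.1 q.1 + 1
          if 2 ≤ k then total + PySem.Int.floordiv (k * (k - 1)) 2 else total)
        total)
    0

-- ===== PORT B =====
def tilted_alt (m : Int) (n : Int) : Int :=
  let intervals : List (Int × Int) :=
    (PySem.List.pyRange 0 (m + n + 1) 1).map
      (fun u => (max (-u) (u - 2 * n), min (2 * m - u) u))
  if intervals = [] then 0
  else
    let pLo := (PySem.List.min? (intervals.map (·.1)) (fun v => v)).getD 0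
    let pHi := (PySem.List.max? (intervals.map (·.2)) (fun v => v)).getD 0
    (PySem.List.pyRange pLo (pHi + 1) 1).foldl
      (fun total a =>
        let freq : PySem.Dict Int Int :=
          intervals.foldl
            (fun freq p =>
              if p.1 ≤ a then freq.insert p.2 (freq.getD p.2 0 + 1) else freq)
            PySem.Dict.empty
        ((PySem.List.pyRange pHi a (-1)).foldl
            (fun st b =>
              let c := st.1 + freq.getD b 0
              (c, st.2 + PySem.Int.floordiv (c * (c - 1)) 2))
            ((0 : Int), total)).2)
      0

-- ===== PRECONDITION & SPEC =====
def Spec_tilted (m : Int) (n : Int) (out : Int) : Prop := out = tilted_alt m n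
instance (m : Int) (n : Int) (out : Int) : Decidable (Spec_tilted m n out) := by unfold Spec_tilted; infer_instance

-- ===== CLAIM (what is proved, stated in full; the proofs are below) =====
def Claim_equal_tilted : Prop := ∀ (m : Int) (n : Int), Dom_tilted m n → Spec_tilted m n (tilted m n)

-- ===== LEMMAS AND PROOFS =====

def pvTri (c : Int) : Int := PySem.Int.floordiv (c * (c - 1)) 2
theorem pvTri_succ (c : Int) : pvTri (c + 1) = pvTri c + c := by
  unfold pvTri
  rw [PySem.Int.floordiv_eq_ediv_of_pos (by norm_num), PySem.Int.floordiv_eq_ediv_of_pos (by norm_num)]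
  have h : (c + 1) * (c + 1 - 1) = c * (c - 1) + c * 2 := by ring
  rw [h, Int.add_mul_ediv_right _ _ (by norm_num)]

theorem pv_inner_count (Hi ghi a : Int) (h : Hi ≤ ghi) :
    ((PySem.List.pyRange ghi a (-1)).map (fun b => if b ≤ Hi then (1 : Int) else 0)).sum
      = if a < Hi then Hi - a else 0 := by
  rw [PySem.List.pyRange_neg_one_eq_reverse, List.map_reverse, List.sum_reverse]
  by_cases ha : a < Hi
  · rw [PySem.List.pyRange_one_append (a+1) (Hi+1) (ghi+1) (by omega) (by omega)]
    rw [List.map_append, List.sum_append]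
    have h1 : ((PySem.List.pyRange (a+1) (Hi+1) 1).map (fun b => if b ≤ Hi then (1 : Int) else 0))
        = (PySem.List.pyRange (a+1) (Hi+1) 1).map (fun _ => (1:Int)) := by
      apply List.map_congr_left
      intro b hb
      rw [PySem.List.mem_pyRange_one] at hb
      simp [show b ≤ Hi by omega]
    have h2 : ((PySem.List.pyRange (Hi+1) (ghi+1) 1).map (fun b => if b ≤ Hi then (1 : Int) else 0))
        = (PySem.List.pyRange (Hi+1) (ghi+1) 1).map (fun _ => (0:Int)) := by
      apply List.map_congr_left
      intro b hb
      rw [PySem.List.mem_pyRange_one] at hb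
      simp [show ¬ b ≤ Hi by omega]
    rw [h1, h2]
    rw [PySem.List.sum_map_const_int, PySem.List.length_pyRange_one]
    simp [ha]
    omega
  · have h2 : ((PySem.List.pyRange (a+1) (ghi+1) 1).map (fun b => if b ≤ Hi then (1 : Int) else 0))
        = (PySem.List.pyRange (a+1) (ghi+1) 1).map (fun _ => (0:Int)) := by
      apply List.map_congr_left
      intro b hb
      rw [PySem.List.mem_pyRange_one] at hb
      simp [show ¬ b ≤ Hi by omega]
    rw [h2]
    simp [ha]

theorem pv_gauss (Lo Hi : Int) (h : Lo ≤ Hi) :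
    ((PySem.List.pyRange Lo Hi 1).map (fun a => Hi - a)).sum = pvTri (Hi - Lo + 1) := by
  have key : ∀ (d : Nat) (Lo : Int), Hi - Lo = d →
      ((PySem.List.pyRange Lo Hi 1).map (fun a => Hi - a)).sum = pvTri (Hi - Lo + 1) := by
    intro d
    induction d with
    | zero => intro Lo hd; rw [PySem.List.pyRange_one_eq_nil (by omega)]
              simp [show Hi - Lo + 1 = 1 by omega, pvTri]
    | succ k ih =>
      intro Lo hd
      rw [PySem.List.pyRange_one_cons (by omega), List.map_cons, List.sum_cons,
          ih (Lo+1) (by omega)]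
      have h2 : Hi - Lo + 1 = (Hi - (Lo+1) + 1) + 1 := by omega
      rw [h2, pvTri_succ (Hi - (Lo+1) + 1)]
      omega
  exact key (Hi - Lo).toNat Lo (by omega)

def pvInd (x : Int × Int) (a b : Int) : Int := if x.1 ≤ a ∧ b ≤ x.2 then 1 else 0
def pvContrib (x y : Int × Int) : Int :=
  let k := min x.2 y.2 - max x.1 y.1 + 1
  if 2 ≤ k then pvTri k else 0

theorem pv_count_box (x y : Int × Int) (glo ghi : Int)
    (hx1 : glo ≤ x.1) (hy1 : glo ≤ y.1) (hx2 : x.2 ≤ ghi) (hy2 : y.2 ≤ ghi) :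
    ((PySem.List.pyRange glo (ghi + 1) 1).map (fun a =>
      ((PySem.List.pyRange ghi a (-1)).map (fun b => pvInd x a b * pvInd y a b)).sum)).sum
      = pvContrib x y := by
  set Lo := max x.1 y.1 with hLo
  set Hi := min x.2 y.2 with hHi
  have hind : ∀ a b, pvInd x a b * pvInd y a b = if Lo ≤ a then (if b ≤ Hi then (1:Int) else 0) else 0 := by
    intro a b
    simp only [pvInd, hLo, hHi]
    by_cases h1 : x.1 ≤ a ∧ b ≤ x.2 <;> by_cases h2 : y.1 ≤ a ∧ b ≤ y.2 <;>
      simp [h1, h2] <;> omega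
  have houter : ∀ a, ((PySem.List.pyRange ghi a (-1)).map (fun b => pvInd x a b * pvInd y a b)).sum
      = if Lo ≤ a ∧ a < Hi then Hi - a else 0 := by
    intro a
    by_cases hLa : Lo ≤ a
    · have : ((PySem.List.pyRange ghi a (-1)).map (fun b => pvInd x a b * pvInd y a b))
          = (PySem.List.pyRange ghi a (-1)).map (fun b => if b ≤ Hi then (1:Int) else 0) := by
        apply List.map_congr_left; intro b _; rw [hind]; simp [hLa]
      rw [this, pv_inner_count Hi ghi a (by omega)]
      by_cases hh : a < Hi <;> simp [hh, hLa]
    · have : ((PySem.List.pyRange ghi a (-1)).map (fun b => pvInd x a b * pvInd y a b))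
          = (PySem.List.pyRange ghi a (-1)).map (fun _ => (0:Int)) := by
        apply List.map_congr_left; intro b _; rw [hind]; simp [hLa]
      rw [this, PySem.List.sum_map_const_int]
      simp [hLa]
  rw [List.map_congr_left (fun a _ => houter a)]
  by_cases hk : Lo < Hi
  · -- split the a-range at Lo and Hi
    rw [PySem.List.pyRange_one_append glo Lo (ghi+1) (by omega) (by omega)]
    rw [List.map_append, List.sum_append]
    rw [PySem.List.pyRange_one_append Lo Hi (ghi+1) (by omega) (by omega)]
    rw [List.map_append, List.sum_append]
    have z1 : ((PySem.List.pyRange glo Lo 1).map (fun a => if Lo ≤ a ∧ a < Hi then Hi - a else 0))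
        = (PySem.List.pyRange glo Lo 1).map (fun _ => (0:Int)) := by
      apply List.map_congr_left; intro a ha
      rw [PySem.List.mem_pyRange_one] at ha
      simp [show ¬ (Lo ≤ a ∧ a < Hi) by omega]
    have z2 : ((PySem.List.pyRange Hi (ghi+1) 1).map (fun a => if Lo ≤ a ∧ a < Hi then Hi - a else 0))
        = (PySem.List.pyRange Hi (ghi+1) 1).map (fun _ => (0:Int)) := by
      apply List.map_congr_left; intro a ha
      rw [PySem.List.mem_pyRange_one] at ha
      simp [show ¬ (Lo ≤ a ∧ a < Hi) by omega]
    have z3 : ((PySem.List.pyRange Lo Hi 1).map (fun a => if Lo ≤ a ∧ a < Hi then Hi - a else 0))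
        = (PySem.List.pyRange Lo Hi 1).map (fun a => Hi - a) := by
      apply List.map_congr_left; intro a ha
      rw [PySem.List.mem_pyRange_one] at ha
      simp [show Lo ≤ a ∧ a < Hi by omega]
    rw [z1, z2, z3, pv_gauss Lo Hi (by omega), PySem.List.sum_map_const_int, PySem.List.sum_map_const_int]
    have hge : (2:Int) ≤ min x.2 y.2 - max x.1 y.1 + 1 := by omega
    simp [pvContrib, hge, hLo, hHi]
  · have z : ((PySem.List.pyRange glo (ghi+1) 1).map (fun a => if Lo ≤ a ∧ a < Hi then Hi - a else 0))
        = (PySem.List.pyRange glo (ghi+1) 1).map (fun _ => (0:Int)) := by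
      apply List.map_congr_left; intro a ha
      simp [show ¬ (Lo ≤ a ∧ a < Hi) by omega]
    rw [z, PySem.List.sum_map_const_int]
    have hlt : ¬ (2:Int) ≤ min x.2 y.2 - max x.1 y.1 + 1 := by omega
    simp [pvContrib, hlt]

def pvCnt (L : List (Int × Int)) (a b : Int) : Int := (L.map (fun x => pvInd x a b)).sum
def pvPairSum : List (Int × Int) → Int
  | [] => 0
  | x :: t => (t.map (pvContrib x)).sum + pvPairSum t
def pvBoxSum (L : List (Int × Int)) (glo ghi : Int) : Int :=
  ((PySem.List.pyRange glo (ghi + 1) 1).map (fun a =>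
    ((PySem.List.pyRange ghi a (-1)).map (fun b => pvTri (pvCnt L a b))).sum)).sum

theorem pv_sum_map_add {α : Type} (l : List α) (f g : α → Int) :
    (l.map (fun x => f x + g x)).sum = (l.map f).sum + (l.map g).sum := by
  induction l with
  | nil => simp
  | cons x t ih => simp [ih]; ring

theorem pv_sum_swap {α β : Type} (A : List α) (B : List β) (f : α → β → Int) :
    (A.map (fun a => (B.map (fun b => f a b)).sum)).sum
      = (B.map (fun b => (A.map (fun a => f a b)).sum)).sum := by
  induction A with
  | nil => simp
  | cons x t ih => simp [ih]

theorem pvTri_ind_add (e c : Int) (he : e = 0 ∨ e = 1) :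
    pvTri (e + c) = e * c + pvTri c := by
  rcases he with h | h
  · simp [h]
  · rw [h, add_comm (1:Int) c, pvTri_succ]; ring

theorem pv_main (L : List (Int × Int)) (glo ghi : Int)
    (h : ∀ p ∈ L, glo ≤ p.1 ∧ p.2 ≤ ghi) :
    pvPairSum L = pvBoxSum L glo ghi := by
  induction L with
  | nil =>
    have h0 : pvTri 0 = 0 := by decide
    simp [pvPairSum, pvBoxSum, pvCnt, h0]
  | cons x t ih =>
    have step1 : ∀ a b, pvTri (pvCnt (x :: t) a b)
        = pvInd x a b * pvCnt t a b + pvTri (pvCnt t a b) := by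
      intro a b
      have hc : pvCnt (x :: t) a b = pvInd x a b + pvCnt t a b := by simp [pvCnt]
      rw [hc, pvTri_ind_add]
      unfold pvInd
      split_ifs <;> simp
    have e1 : pvBoxSum (x :: t) glo ghi
        = ((PySem.List.pyRange glo (ghi + 1) 1).map (fun a =>
            ((PySem.List.pyRange ghi a (-1)).map (fun b => pvInd x a b * pvCnt t a b)).sum)).sum
          + pvBoxSum t glo ghi := by
      unfold pvBoxSum
      rw [← pv_sum_map_add]
      apply congrArg
      apply List.map_congr_left
      intro a _
      rw [← pv_sum_map_add]
      apply congrArg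
      apply List.map_congr_left
      intro b _
      exact step1 a b
    have e2 : ((PySem.List.pyRange glo (ghi + 1) 1).map (fun a =>
          ((PySem.List.pyRange ghi a (-1)).map (fun b => pvInd x a b * pvCnt t a b)).sum)).sum
        = (t.map (pvContrib x)).sum := by
      have s1 : ∀ a, ((PySem.List.pyRange ghi a (-1)).map (fun b => pvInd x a b * pvCnt t a b)).sum
          = (t.map (fun y => ((PySem.List.pyRange ghi a (-1)).map
              (fun b => pvInd x a b * pvInd y a b)).sum)).sum := by
        intro a
        have hb : ∀ b ∈ PySem.List.pyRange ghi a (-1),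
            pvInd x a b * pvCnt t a b = (t.map (fun y => pvInd x a b * pvInd y a b)).sum := by
          intro b _
          unfold pvCnt
          rw [List.sum_map_mul_left]
        rw [List.map_congr_left hb, pv_sum_swap]
      rw [List.map_congr_left (fun a _ => s1 a), pv_sum_swap]
      apply congrArg
      apply List.map_congr_left
      intro y hy
      exact pv_count_box x y glo ghi (h x (List.mem_cons_self)).1
        (h y (List.mem_cons_of_mem x hy)).1 (h x (List.mem_cons_self)).2
        (h y (List.mem_cons_of_mem x hy)).2
    have hIH := ih (fun p hp => h p (List.mem_cons_of_mem x hp))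
    simp only [pvPairSum]
    rw [hIH, e1, e2]

theorem pv_foldl_add {α : Type} (F : Int → α → Int) (g : α → Int) (l : List α)
    (hF : ∀ acc a, a ∈ l → F acc a = acc + g a) : ∀ t0, l.foldl F t0 = t0 + (l.map g).sum := by
  induction l with
  | nil => intro t0; simp
  | cons x t ih =>
    intro t0
    rw [List.foldl_cons, hF t0 x List.mem_cons_self,
        ih (fun acc a ha => hF acc a (List.mem_cons_of_mem x ha))]
    simp [add_assoc]

def pvIvals (m n : Int) : List (Int × Int) :=
  (PySem.List.pyRange 0 (m + n + 1) 1).map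
    (fun u => (max (-u) (u - 2 * n), min (2 * m - u) u))


theorem pvA_loop (R : List (Int × Int)) :
    ∀ (l : List (Int × Int)) (j : Nat) (t0 : Int), R.drop j = l →
    (PySem.List.enumerate l (j : Int)).foldl
      (fun total ip =>
        (PySem.List.slice R (some (ip.1 + 1)) none).foldl
          (fun total q =>
            let k := min ip.2.2 q.2 - max ip.2.1 q.1 + 1
            if 2 ≤ k then total + PySem.Int.floordiv (k * (k - 1)) 2 else total)
          total)
      t0
      = t0 + pvPairSum l := by
  intro l
  induction l with
  | nil => intro j t0 _; simp [PySem.List.enumerate_nil, pvPairSum]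
  | cons p l' ih =>
    intro j t0 hdrop
    rw [PySem.List.enumerate_cons, List.foldl_cons]
    have hcast : ((j : Int) + 1) = (((j + 1 : Nat)) : Int) := by omega
    have hdrop' : R.drop (j + 1) = l' := by
      have h1 : R.drop (j + 1) = (R.drop j).drop 1 := by
        rw [List.drop_drop]
      rw [h1, hdrop, List.drop_one, List.tail_cons]
    have hinner : (PySem.List.slice R (some (((j : Int), p).1 + 1)) none).foldl
        (fun total q =>
          let k := min ((j : Int), p).2.2 q.2 - max ((j : Int), p).2.1 q.1 + 1
          if 2 ≤ k then total + PySem.Int.floordiv (k * (k - 1)) 2 else total)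
        t0 = t0 + (l'.map (pvContrib p)).sum := by
      show (PySem.List.slice R (some ((j : Int) + 1)) none).foldl _ t0 = _
      rw [hcast, PySem.List.slice_from_natCast, hdrop']
      apply pv_foldl_add
      intro acc q _
      simp only [pvContrib, pvTri]
      split <;> simp
    rw [hinner, hcast, ih (j + 1) (t0 + (l'.map (pvContrib p)).sum) hdrop']
    simp [pvPairSum]
    ring

theorem pv_portA (m n : Int) : tilted m n = pvPairSum (pvIvals m n) := by
  have h := pvA_loop (pvIvals m n) (pvIvals m n) 0 0 rfl
  unfold pvIvals at h
  unfold tilted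
  simpa using h

theorem pv_sum_ind_mem (ys : List Int) (c : Int) (hnd : ys.Nodup) :
    (ys.map (fun y => if y = c then (1 : Int) else 0)).sum = if c ∈ ys then 1 else 0 := by
  induction ys with
  | nil => simp
  | cons z t ih =>
    rw [List.nodup_cons] at hnd
    rw [List.map_cons, List.sum_cons, ih hnd.2]
    by_cases hz : z = c
    · subst hz
      simp [hnd.1]
    · simp [hz, Ne.symm hz]

theorem pv_freq_getD (a : Int) : ∀ (L : List (Int × Int)) (v : Int) (d : PySem.Dict Int Int),
    (L.foldl (fun d p => if p.1 ≤ a then d.insert p.2 (d.getD p.2 0 + 1) else d) d).getD v 0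
      = d.getD v 0 + (((L.filter (fun p => decide (p.1 ≤ a))).map (fun p => p.2)).count v : Int) := by
  intro L
  induction L with
  | nil => intro v d; simp
  | cons p t ih =>
    intro v d
    rw [List.foldl_cons]
    by_cases hp : p.1 ≤ a
    · rw [if_pos hp]
      rw [ih v (d.insert p.2 (d.getD p.2 0 + 1))]
      have hf : (p :: t).filter (fun p => decide (p.1 ≤ a)) = p :: t.filter (fun p => decide (p.1 ≤ a)) := by
        simp [hp]
      rw [hf, List.map_cons, List.count_cons]
      rw [PySem.Dict.getD_insert]
      by_cases hv : v = p.2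
      · simp [hv]; ring
      · have hvs : ¬ p.2 = v := fun hh => hv hh.symm
        simp [hv, hvs]
    · rw [if_neg hp]
      rw [ih v d]
      have hf : (p :: t).filter (fun p => decide (p.1 ≤ a)) = t.filter (fun p => decide (p.1 ≤ a)) := by
        simp [hp]
      rw [hf]

theorem pvB_descend (f : Int → Int) :
    ∀ (d : Nat) (p b : Int), (p - b).toNat = d → ∀ (c0 t0 : Int),
    (PySem.List.pyRange p b (-1)).foldl
        (fun st x => (st.1 + f x, st.2 + pvTri (st.1 + f x))) (c0, t0)
      = (c0 + ((PySem.List.pyRange p b (-1)).map f).sum,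
         t0 + ((PySem.List.pyRange p b (-1)).map (fun x =>
            pvTri (c0 + ((PySem.List.pyRange p (x - 1) (-1)).map f).sum))).sum) := by
  intro d
  induction d with
  | zero =>
    intro p b hd c0 t0
    rw [PySem.List.pyRange_neg_one_eq_nil (by omega)]
    simp
  | succ k ih =>
    intro p b hd c0 t0
    rw [PySem.List.pyRange_neg_one_cons (by omega), List.foldl_cons,
        ih (p - 1) b (by omega) (c0 + f p) (t0 + pvTri (c0 + f p))]
    rw [List.map_cons, List.sum_cons, List.map_cons, List.sum_cons]
    have h1 : PySem.List.pyRange p (p - 1) (-1) = [p] := by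
      rw [PySem.List.pyRange_neg_one_cons (by omega), PySem.List.pyRange_neg_one_eq_nil (by omega)]
    have hx : ∀ x ∈ PySem.List.pyRange (p - 1) b (-1),
        pvTri (c0 + f p + ((PySem.List.pyRange (p - 1) (x - 1) (-1)).map f).sum)
          = pvTri (c0 + ((PySem.List.pyRange p (x - 1) (-1)).map f).sum) := by
      intro x hmem
      rw [PySem.List.mem_pyRange_neg_one] at hmem
      rw [PySem.List.pyRange_neg_one_cons (show x - 1 < p by omega), List.map_cons, List.sum_cons]
      ring_nf
    simp only [Prod.mk.injEq]
    refine ⟨by ring, ?_⟩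
    rw [h1, List.map_congr_left hx]
    simp only [List.map_cons, List.map_nil, List.sum_cons, List.sum_nil]
    ring_nf

theorem pv_cnt_chain (a x pHi : Int) :
    ∀ (L : List (Int × Int)), (∀ p ∈ L, p.2 ≤ pHi) →
    ((PySem.List.pyRange pHi (x - 1) (-1)).map (fun y =>
        (((L.filter (fun p => decide (p.1 ≤ a))).map (fun p => p.2)).count y : Int))).sum
      = pvCnt L a x := by
  intro L
  induction L with
  | nil => simp [pvCnt]
  | cons p t ih =>
    intro hb
    have hbt : ∀ q ∈ t, q.2 ≤ pHi := fun q hq => hb q (List.mem_cons_of_mem p hq)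
    by_cases hp : p.1 ≤ a
    · have hf : (p :: t).filter (fun p => decide (p.1 ≤ a)) = p :: t.filter (fun p => decide (p.1 ≤ a)) := by
        simp [hp]
      have hterm : ∀ y ∈ PySem.List.pyRange pHi (x - 1) (-1),
          ((((p :: t).filter (fun p => decide (p.1 ≤ a))).map (fun p => p.2)).count y : Int)
            = (((t.filter (fun p => decide (p.1 ≤ a))).map (fun p => p.2)).count y : Int)
              + (if y = p.2 then 1 else 0) := by
        intro y _
        rw [hf, List.map_cons, List.count_cons]
        by_cases hy : y = p.2
        · simp [hy]
        · have hys : ¬ p.2 = y := fun hh => hy hh.symm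
          simp [hy, hys]
      rw [List.map_congr_left hterm, pv_sum_map_add, ih hbt,
          pv_sum_ind_mem _ _ (by rw [PySem.List.pyRange_neg_one_eq_reverse]; exact List.nodup_reverse.mpr (PySem.List.nodup_pyRange_one _ _))]
      have hmem : p.2 ∈ PySem.List.pyRange pHi (x - 1) (-1) ↔ (x ≤ p.2) := by
        rw [PySem.List.mem_pyRange_neg_one]
        constructor
        · intro h; omega
        · intro h; exact ⟨by omega, hb p List.mem_cons_self⟩
      simp only [pvCnt, List.map_cons, List.sum_cons, pvInd]
      by_cases hx2 : x ≤ p.2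
      · simp [hmem.mpr hx2, hp, hx2]; ring
      · have hnm : p.2 ∉ PySem.List.pyRange pHi (x - 1) (-1) := fun hc => hx2 (hmem.mp hc)
        simp [hnm, hp, hx2]
    · have hf : (p :: t).filter (fun p => decide (p.1 ≤ a)) = t.filter (fun p => decide (p.1 ≤ a)) := by
        simp [hp]
      rw [hf, ih hbt]
      simp only [pvCnt, List.map_cons, List.sum_cons, pvInd]
      simp [hp]


theorem pv_bounds_lo (L : List (Int × Int)) (hne : L ≠ []) :
    ∀ p ∈ L, (PySem.List.min? (L.map (·.1)) (fun v => v)).getD 0 ≤ p.1 := by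
  intro p hp
  cases h : PySem.List.min? (L.map (·.1)) (fun v => v) with
  | none =>
    rw [PySem.List.min?_eq_none_iff] at h
    simp at h
    exact absurd h hne
  | some v => simpa using PySem.List.min?_isMin h p.1 (List.mem_map_of_mem hp)

theorem pv_bounds_hi (L : List (Int × Int)) (hne : L ≠ []) :
    ∀ p ∈ L, p.2 ≤ (PySem.List.max? (L.map (·.2)) (fun v => v)).getD 0 := by
  intro p hp
  cases h : PySem.List.max? (L.map (·.2)) (fun v => v) with
  | none =>
    rw [PySem.List.max?_eq_none_iff] at h
    simp at h
    exact absurd h hne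
  | some v => simpa using PySem.List.max?_isMax h p.2 (List.mem_map_of_mem hp)

theorem pv_portB (m n : Int) (hne : pvIvals m n ≠ []) :
    tilted_alt m n = pvBoxSum (pvIvals m n)
      ((PySem.List.min? ((pvIvals m n).map (·.1)) (fun v => v)).getD 0)
      ((PySem.List.max? ((pvIvals m n).map (·.2)) (fun v => v)).getD 0) := by
  have hne' : ¬ ((PySem.List.pyRange 0 (m + n + 1) 1).map
      (fun u => (max (-u) (u - 2 * n), min (2 * m - u) u)) = []) := by
    unfold pvIvals at hne; exact hne
  simp only [tilted_alt]
  rw [if_neg hne']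
  have hL : (PySem.List.pyRange 0 (m + n + 1) 1).map
      (fun u => (max (-u) (u - 2 * n), min (2 * m - u) u)) = pvIvals m n := rfl
  rw [hL]
  set L := pvIvals m n with hLdef
  set pLo := (PySem.List.min? (L.map (·.1)) (fun v => v)).getD 0 with hpLo
  set pHi := (PySem.List.max? (L.map (·.2)) (fun v => v)).getD 0 with hpHi
  have hbnd : ∀ p ∈ L, p.2 ≤ pHi := pv_bounds_hi L hne
  rw [pv_foldl_add _ (fun a => ((PySem.List.pyRange pHi a (-1)).map
      (fun b => pvTri (pvCnt L a b))).sum) _ ?_ 0]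
  · simp [pvBoxSum]
  · intro total a _
    show ((PySem.List.pyRange pHi a (-1)).foldl
        (fun st x => (st.1 + (L.foldl (fun freq p =>
            if p.1 ≤ a then freq.insert p.2 (freq.getD p.2 0 + 1) else freq)
            PySem.Dict.empty).getD x 0,
          st.2 + pvTri (st.1 + (L.foldl (fun freq p =>
            if p.1 ≤ a then freq.insert p.2 (freq.getD p.2 0 + 1) else freq)
            PySem.Dict.empty).getD x 0)))
        ((0 : Int), total)).2 = _
    rw [pvB_descend _ (pHi - a).toNat pHi a rfl 0 total]
    simp only []
    congr 1
    apply congrArg List.sum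
    apply List.map_congr_left
    intro x hx
    have hgetD : ∀ y, (L.foldl (fun freq p =>
        if p.1 ≤ a then freq.insert p.2 (freq.getD p.2 0 + 1) else freq)
        PySem.Dict.empty).getD y 0
        = (((L.filter (fun p => decide (p.1 ≤ a))).map (fun p => p.2)).count y : Int) := by
      intro y
      rw [pv_freq_getD a L y PySem.Dict.empty, PySem.Dict.getD_empty]
      ring
    rw [List.map_congr_left (fun y _ => hgetD y), pv_cnt_chain a x pHi L hbnd]
    ring_nf

theorem tilted_eq (m n : Int) : tilted m n = tilted_alt m n := by
  by_cases hne : pvIvals m n = []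
  · rw [pv_portA, hne]
    simp only [tilted_alt]
    unfold pvIvals at hne
    rw [if_pos hne]
    rfl
  · rw [pv_portA, pv_portB m n hne]
    exact pv_main _ _ _ (fun p hp => ⟨pv_bounds_lo _ hne p hp, pv_bounds_hi _ hne p hp⟩)

-- ===== VERDICT (by name: the statement is the Claim_ definition above) =====
theorem tilted_spec : Claim_equal_tilted := by
  intro m n _
  unfold Spec_tilted
  exact tilted_eq m n
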